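-- pv_equiv track=rewrite | github.com/Aadhavsb/chunkedCompression | utils.py | get_compression_map
-- ===== SOURCE A (Python) =====
-- from typing import List
--
-- def get_compression_map(tokens: List[int]) -> List[str]:
--     """
--     Map each token to a compression option for testing
--
--     Args:
--         tokens: List of token IDs
--
--     Returns:
--         List of compression options ("low", "med", "high") per token
--     """
--     T = len(tokens)
--     compression_map = []
--
--     # Simple rule: first 40% -> low, next 40% -> med, rest -> high
--     for i in range(T):
--         if i < T * 0.4:
--             compression_map.append("low")
--         elif i < T * 0.8:
--             compression_map.append("med")
--         else:
--             compression_map.append("high")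
--
--     return compression_map
-- ===== SOURCE B (Python) =====
-- from typing import List
--
-- def get_compression_map(tokens: List[int]) -> List[str]:
--     # Paint the whole list "high", then overwrite the 80%-prefix with "med"
--     # and the 40%-prefix with "low".  Integer ceilings -(-k // 5) are exact
--     # stand-ins for the float thresholds (see note in the Lean file).
--     T = len(tokens)
--     out = ["high"] * T
--     m = -(-4 * T // 5)
--     out[:m] = ["med"] * m
--     n = -(-2 * T // 5)
--     out[:n] = ["low"] * n
--     return out
-- ===== Notes on version B (the rewrite author's own statement) =====
-- stated objective: simpler
-- what changed: Replaces the per-index comparison loop with prefix painting: allocate the whole list as 'high', then overwrite the 80%-prefix with 'med' and the 40%-prefix with 'low' via slice assignment, using integer ceilings instead of per-element float comparisons.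
import Mathlib
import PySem

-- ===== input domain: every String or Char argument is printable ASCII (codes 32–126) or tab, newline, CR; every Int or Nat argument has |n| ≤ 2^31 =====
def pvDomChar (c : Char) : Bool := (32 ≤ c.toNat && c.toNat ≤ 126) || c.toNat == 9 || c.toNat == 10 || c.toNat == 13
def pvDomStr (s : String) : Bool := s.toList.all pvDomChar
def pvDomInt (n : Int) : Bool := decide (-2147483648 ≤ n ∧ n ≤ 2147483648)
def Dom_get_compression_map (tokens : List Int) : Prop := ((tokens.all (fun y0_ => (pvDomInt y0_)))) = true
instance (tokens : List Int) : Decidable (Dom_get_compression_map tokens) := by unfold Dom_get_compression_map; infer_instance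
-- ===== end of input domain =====

-- B replaces A's per-index loop with prefix painting: all-"high", then overwrite the
-- 80%- and 40%-prefixes (objective: simpler).
-- Float note (both ports): for any list length T, the exact IEEE-754 products T*0.4 and
-- T*0.8 equal 2T/5 + T/(5*2^53) resp. 4T/5 + 2T/(5*2^53), which lie strictly within half an
-- ulp of 2T/5 resp. 4T/5; hence the strict comparisons `i < T*0.4` / `i < T*0.8` agree
-- exactly with the rational comparisons 5*i < 2*T / 5*i < 4*T, and the integer ceilings
-- -(-4*T//5) / -(-2*T//5) in B equal ⌈4T/5⌉ / ⌈2T/5⌉. The ports use these exact forms.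

-- ===== PORT A =====
def get_compression_map (tokens : List Int) : List String :=
  let T := tokens.length
  -- for i in range(T): append "low"/"med"/"high" per the two float threshold tests
  (List.range T).foldl
    (fun acc i =>
      acc ++ [if 5 * i < 2 * T then "low" else if 5 * i < 4 * T then "med" else "high"])
    []

-- ===== PORT B =====
-- Python slice assignment out[:k] = X with len(X) = k is, on lists, X ++ out.drop k
-- (exact: it replaces the first k elements).
def get_compression_map_alt (tokens : List Int) : List String :=
  let T := tokens.length
  let out0 := List.replicate T "high"
  let m := (4 * T + 4) / 5                     -- -(-4*T//5), exact integer ceiling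
  let out1 := List.replicate m "med" ++ out0.drop m
  let n := (2 * T + 4) / 5                     -- -(-2*T//5), exact integer ceiling
  List.replicate n "low" ++ out1.drop n

-- ===== PRECONDITION & SPEC =====
def Spec_get_compression_map (tokens : List Int) (out : List String) : Prop := out = get_compression_map_alt tokens
instance (tokens : List Int) (out : List String) : Decidable (Spec_get_compression_map tokens out) := by unfold Spec_get_compression_map; infer_instance

-- ===== CLAIM =====
def Claim_equal_get_compression_map : Prop := ∀ (tokens : List Int), Dom_get_compression_map tokens → Spec_get_compression_map tokens (get_compression_map tokens)

-- ===== LEMMAS AND PROOFS =====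

theorem pv_foldl_push {α β : Type} (f : α → β) :
    ∀ (l : List α) (acc : List β),
      l.foldl (fun a x => a ++ [f x]) acc = acc ++ l.map f := by
  intro l
  induction l with
  | nil => simp
  | cons x xs ih => intro acc; simp [List.foldl, ih]

theorem pv_map_const_range' {β : Type} (f : ℕ → β) (c : β) (s n : ℕ)
    (h : ∀ i, s ≤ i → i < s + n → f i = c) :
    (List.range' s n).map f = List.replicate n c := by
  rw [List.eq_replicate_iff]
  constructor
  · simp
  · intro b hb
    rcases List.mem_map.mp hb with ⟨i, hi, rfl⟩
    rw [List.mem_range'_1] at hi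
    exact h i hi.1 hi.2

theorem pv_range_split (a m T : ℕ) (h1 : a ≤ m) (h2 : m ≤ T) :
    List.range T = List.range' 0 a ++ (List.range' a (m - a) ++ List.range' m (T - m)) := by
  have e1 : a + (T - a) = T := by omega
  have e2 : T - a = (m - a) + (T - m) := by omega
  have e3 : a + (m - a) = m := by omega
  calc List.range T = List.range' 0 (a + (T - a)) := by rw [e1, List.range_eq_range']
    _ = List.range' 0 a ++ List.range' (0 + a) (T - a) := List.range'_append_1.symm
    _ = List.range' 0 a ++ List.range' a ((m - a) + (T - m)) := by rw [Nat.zero_add, e2]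
    _ = List.range' 0 a ++ (List.range' a (m - a) ++ List.range' (a + (m - a)) (T - m)) := by
        rw [List.range'_append_1]
    _ = List.range' 0 a ++ (List.range' a (m - a) ++ List.range' m (T - m)) := by rw [e3]

-- B's painted list unfolds to three replicate blocks.
theorem pv_alt_blocks (tokens : List Int) :
    get_compression_map_alt tokens =
      List.replicate ((2 * tokens.length + 4) / 5) "low" ++
      (List.replicate ((4 * tokens.length + 4) / 5 - (2 * tokens.length + 4) / 5) "med" ++
       List.replicate (tokens.length - (4 * tokens.length + 4) / 5) "high") := by
  unfold get_compression_map_alt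
  set T := tokens.length with hT
  set m := (4 * T + 4) / 5 with hm
  set n := (2 * T + 4) / 5 with hn
  have h1 : n ≤ m := by omega
  have h2 : m ≤ T := by omega
  show List.replicate n "low" ++
      List.drop n (List.replicate m "med" ++ List.drop m (List.replicate T "high")) = _
  rw [List.drop_replicate, List.drop_append_of_le_length (by simp [h1]),
    List.drop_replicate]

theorem get_compression_map_spec : Claim_equal_get_compression_map := by
  intro tokens _
  unfold Spec_get_compression_map
  rw [pv_alt_blocks]
  unfold get_compression_map
  set T := tokens.length with hT
  set a := (2 * T + 4) / 5 with ha
  set m := (4 * T + 4) / 5 with hm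
  have h1 : a ≤ m := by omega
  have h2 : m ≤ T := by omega
  rw [pv_foldl_push, List.nil_append, pv_range_split a m T h1 h2,
    List.map_append, List.map_append]
  congr 1
  · apply pv_map_const_range'
    intro i hi1 hi2
    rw [if_pos (by omega)]
  congr 1
  · apply pv_map_const_range'
    intro i hi1 hi2
    rw [if_neg (by omega), if_pos (by omega)]
  · apply pv_map_const_range'
    intro i hi1 hi2
    rw [if_neg (by omega), if_neg (by omega)]
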